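-- pv_equiv track=rewrite | github.com/mairaladeira/owlpackagesgenerator | generator/owl_packages_generator.py | get_content
-- ===== SOURCE A (Python) =====
-- def get_content(name):
--     names = name.split(',')
--     names_list = set()
--     for n in names:
--         packs_or = n.split('|')
--         for p in packs_or:
--             p = p.split('<')
--             p = p[0].split('(')
--             p = p[0].strip().replace(' ', '_')
--             names_list.add(p)
--     return names_list
-- ===== SOURCE B (Python) =====
-- def get_content(name):
--     result = set()
--     for tok in name.replace('|', ',').split(','):
--         head = []
--         for ch in tok:
--             if ch in '<(':
--                 break
--             head.append(ch)
--         result.add(''.join(head).strip().replace(' ', '_'))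
--     return result
-- ===== Notes on version B (the rewrite author's own statement) =====
-- stated objective: simpler
-- what changed: B flattens A's nested comma-then-pipe split loops into one pass over a single split of name.replace('|', ','), and cuts each token at the first '<' or '(' with one character scan instead of A's two split-and-take-first calls.
import Mathlib
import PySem

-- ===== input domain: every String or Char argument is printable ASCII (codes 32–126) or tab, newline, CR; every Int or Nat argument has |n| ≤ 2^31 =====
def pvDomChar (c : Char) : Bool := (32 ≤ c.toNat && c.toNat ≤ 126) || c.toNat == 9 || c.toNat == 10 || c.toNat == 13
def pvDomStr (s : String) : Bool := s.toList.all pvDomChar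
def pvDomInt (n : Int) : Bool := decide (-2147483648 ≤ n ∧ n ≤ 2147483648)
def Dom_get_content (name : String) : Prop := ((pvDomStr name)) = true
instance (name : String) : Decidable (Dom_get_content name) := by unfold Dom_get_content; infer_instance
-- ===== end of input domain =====

-- B replaces A's nested comma-then-pipe split loops by one flat pass over a single split
-- of name.replace('|', ',') and cuts each token at the first '<' or '(' with one scan
-- instead of two splits; same cost, simpler decomposition (objective: simpler).

-- ===== PORT A =====
-- Strings are handled on the List Char side via PySem.Chars (exact); the Python set of
-- strings is a PySem.Set of char lists (String.ofList is injective, so dedup agrees),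
-- converted to List String at the end. p[0] on a split result is PySem.List.pyGetD _ 0 []
-- (split never returns an empty list, so Python's p[0] never raises).
def get_content (name : String) : List String :=
  let names := PySem.Chars.splitOn name.toList [',']
  (names.foldl (fun acc n =>
      (PySem.Chars.splitOn n ['|']).foldl (fun acc p =>
          let p1 := PySem.Chars.splitOn p ['<']
          let p2 := PySem.Chars.splitOn (PySem.List.pyGetD p1 0 []) ['(']
          PySem.Set.add acc
            (PySem.Chars.replace (PySem.Chars.strip (PySem.List.pyGetD p2 0 [])) [' '] ['_']))
        acc)
    PySem.Set.empty).map String.ofList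

-- ===== PORT B =====
-- Source B's inner for-loop collecting chars until the first '<' or '(' (break) is
-- List.takeWhile, ported by hand (exact: same chars kept, stop at first hit).
def get_content_alt (name : String) : List String :=
  ((PySem.Chars.splitOn (PySem.Chars.replace name.toList ['|'] [',']) [',']).foldl
      (fun res tok =>
        PySem.Set.add res
          (PySem.Chars.replace
            (PySem.Chars.strip (tok.takeWhile (fun ch => !(ch == '<' || ch == '('))))
            [' '] ['_']))
      PySem.Set.empty).map String.ofList

-- ===== PRECONDITION & SPEC =====
def Spec_get_content (name : String) (out : List String) : Prop := out = get_content_alt name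
instance (name : String) (out : List String) : Decidable (Spec_get_content name out) := by unfold Spec_get_content; infer_instance

-- ===== CLAIM (what is proved, stated in full; the proofs are below) =====
def Claim_equal_get_content : Prop := ∀ (name : String), Dom_get_content name → Spec_get_content name (get_content name)

-- ===== LEMMAS AND PROOFS =====

-- cons x onto the head piece of a split-in-progress
def consHd (x : Char) : List (List Char) → List (List Char)
  | [] => [[x]]
  | h :: t => (x :: h) :: t

-- structural characterisation of splitting on one character
def mySplit (c : Char) : List Char → List (List Char)
  | [] => [[]]
  | x :: xs => if x = c then [] :: mySplit c xs else consHd x (mySplit c xs)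

def consPre (pre : List Char) : List (List Char) → List (List Char)
  | [] => [pre]
  | h :: t => (pre ++ h) :: t

lemma mySplit_ne_nil (c : Char) (l : List Char) : mySplit c l ≠ [] := by
  cases l with
  | nil => simp [mySplit]
  | cons x xs =>
    simp only [mySplit]
    split
    · simp
    · cases h : mySplit c xs <;> simp [consHd]

lemma go_spec (c : Char) (fuel : Nat) : ∀ (l cur : List Char) (acc : List (List Char)),
    l.length ≤ fuel →
    PySem.Chars.splitOn.go [c] fuel l cur acc
      = acc.reverse ++ consPre cur.reverse (mySplit c l) := by
  induction fuel with
  | zero =>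
    intro l cur acc h
    have : l = [] := by cases l <;> simp_all
    subst this
    simp [PySem.Chars.splitOn.go, mySplit, consPre]
  | succ n ih =>
    intro l cur acc h
    cases l with
    | nil => simp [PySem.Chars.splitOn.go, mySplit, consPre]
    | cons x rest =>
      rw [PySem.Chars.splitOn.go]
      by_cases hx : c = x
      · subst hx
        have hp : [c].isPrefixOf (c :: rest) = true := by simp [List.isPrefixOf]
        simp only [hp, if_true, List.length_cons, List.length_nil, List.drop_succ_cons, List.drop_zero]
        rw [ih rest [] (cur.reverse :: acc) (by simpa using h)]
        obtain ⟨h0, t0, ht⟩ : ∃ h0 t0, mySplit c rest = h0 :: t0 := by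
          cases hm : mySplit c rest with
          | nil => exact absurd hm (mySplit_ne_nil c rest)
          | cons a b => exact ⟨a, b, rfl⟩
        simp [mySplit, ht, consPre]
      · have hp : [c].isPrefixOf (x :: rest) = false := by
          simp [List.isPrefixOf]
          intro hcx; exact absurd hcx hx
        simp only [hp, Bool.false_eq_true, if_false]
        rw [ih rest (x :: cur) acc (by simpa using h)]
        have hx' : ¬ (x = c) := fun hh => hx hh.symm
        cases hm : mySplit c rest with
        | nil => exact absurd hm (mySplit_ne_nil c rest)
        | cons a b => simp [mySplit, hx', hm, consHd, consPre]

lemma splitOn_single (c : Char) (l : List Char) :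
    PySem.Chars.splitOn l [c] = mySplit c l := by
  rw [PySem.Chars.splitOn, go_spec c (l.length + 1) l [] [] (by omega)]
  cases hm : mySplit c l with
  | nil => exact absurd hm (mySplit_ne_nil c l)
  | cons a b => simp [consPre]

lemma replace_go_spec (a b : Char) (fuel : Nat) : ∀ (l acc : List Char),
    l.length ≤ fuel →
    PySem.Chars.replace.go [a] [b] fuel l acc
      = acc.reverse ++ l.map (fun x => if x = a then b else x) := by
  induction fuel with
  | zero =>
    intro l acc h
    have : l = [] := by cases l <;> simp_all
    subst this
    simp [PySem.Chars.replace.go]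
  | succ n ih =>
    intro l acc h
    cases l with
    | nil => simp [PySem.Chars.replace.go]
    | cons x rest =>
      rw [PySem.Chars.replace.go]
      by_cases hx : a = x
      · subst hx
        have hp : [a].isPrefixOf (a :: rest) = true := by simp [List.isPrefixOf]
        simp only [hp, if_true, List.length_cons, List.length_nil, List.drop_succ_cons,
          List.drop_zero, List.reverse_cons, List.reverse_nil, List.nil_append,
          List.singleton_append]
        rw [ih rest (b :: acc) (by simpa using h)]
        simp
      · have hp : [a].isPrefixOf (x :: rest) = false := by
          simp [List.isPrefixOf]
          intro hcx; exact absurd hcx hx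
        simp only [hp, Bool.false_eq_true, if_false]
        rw [ih rest (x :: acc) (by simpa using h)]
        have hx' : ¬ (x = a) := fun hh => hx hh.symm
        simp [hx']

lemma replace_single (a b : Char) (l : List Char) :
    PySem.Chars.replace l [a] [b] = l.map (fun x => if x = a then b else x) := by
  rw [PySem.Chars.replace]
  simp only [List.isEmpty_cons, Bool.false_eq_true, if_false]
  exact replace_go_spec a b l.length l [] (le_refl _)

lemma mySplit_head (c : Char) (l : List Char) :
    ∃ t, mySplit c l = (l.takeWhile (fun x => x != c)) :: t := by
  induction l with
  | nil => exact ⟨[], rfl⟩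
  | cons x xs ih =>
    obtain ⟨t, ht⟩ := ih
    by_cases hx : x = c
    · exact ⟨mySplit c xs, by simp [mySplit, hx, List.takeWhile]⟩
    · have hb : (x != c) = true := by simp [hx]
      exact ⟨t, by simp [mySplit, hx, List.takeWhile, ht, consHd, hb]⟩

lemma consHd_append (x : Char) (m rest : List (List Char)) (hm : m ≠ []) :
    consHd x (m ++ rest) = consHd x m ++ rest := by
  cases m with
  | nil => exact absurd rfl hm
  | cons h t => simp [consHd]

-- splitting on ',' after '|'→',' = splitting on ',' then each piece on '|'
lemma mySplit_flatMap (l : List Char) :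
    mySplit ',' (l.map (fun x => if x = '|' then ',' else x))
      = (mySplit ',' l).flatMap (mySplit '|') := by
  induction l with
  | nil => simp [mySplit]
  | cons x xs ih =>
    by_cases h1 : x = ','
    · subst h1
      simp only [List.map_cons, if_neg (by decide : ¬ (',' = '|'))]
      simp [mySplit, ih]
    · by_cases h2 : x = '|'
      · subst h2
        simp only [List.map_cons]
        obtain ⟨h0, t0, ht⟩ : ∃ h0 t0, mySplit ',' xs = h0 :: t0 := by
          cases hm : mySplit ',' xs with
          | nil => exact absurd hm (mySplit_ne_nil _ _)
          | cons a b => exact ⟨a, b, rfl⟩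
        simp only [mySplit, if_neg (by decide : ¬ ('|' = ',')), ht, consHd,
          List.flatMap_cons, ih]
        simp
      · simp only [List.map_cons, if_neg h2]
        obtain ⟨h0, t0, ht⟩ : ∃ h0 t0, mySplit ',' xs = h0 :: t0 := by
          cases hm : mySplit ',' xs with
          | nil => exact absurd hm (mySplit_ne_nil _ _)
          | cons a b => exact ⟨a, b, rfl⟩
        rw [mySplit, if_neg h1, ih, mySplit, if_neg h1, ht]
        simp only [List.flatMap_cons]
        rw [consHd_append x (mySplit '|' h0) _ (mySplit_ne_nil _ _)]
        congr 1
        cases hm : mySplit '|' h0 with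
        | nil => exact absurd hm (mySplit_ne_nil _ _)
        | cons a b => simp [mySplit, if_neg h2, hm, consHd]

lemma pyGetD_mySplit_zero (c : Char) (l : List Char) :
    PySem.List.pyGetD (mySplit c l) 0 [] = l.takeWhile (fun x => x != c) := by
  obtain ⟨t, ht⟩ := mySplit_head c l
  rw [ht]
  simp [PySem.List.pyGetD, PySem.List.pyGet?, PySem.List.pyIdx?]

-- A's split-at-'<'-then-'(' head equals B's single takeWhile
lemma norm_eq (p : List Char) :
    PySem.List.pyGetD (mySplit '(' (PySem.List.pyGetD (mySplit '<' p) 0 [])) 0 []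
      = p.takeWhile (fun ch => !(ch == '<' || ch == '(')) := by
  rw [pyGetD_mySplit_zero, pyGetD_mySplit_zero, List.takeWhile_takeWhile]
  congr 1
  funext ch
  by_cases h1 : ch = '<' <;> by_cases h2 : ch = '(' <;> simp [h1, h2]

-- ===== VERDICT (by name: the statement is the Claim_ definition above) =====
theorem get_content_spec : Claim_equal_get_content := by
  intro name _
  unfold Spec_get_content get_content get_content_alt
  simp only [replace_single, splitOn_single, norm_eq, mySplit_flatMap, List.foldl_flatMap]
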